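-- pv_equiv track=rewrite | github.com/HarryCashel/poker_challenge | main.py | find_next_largest
-- ===== SOURCE A (Python) =====
-- def find_next_largest(hand1, hand2, tie_value):
--     """Function to find the next biggest value in the result of a tie"""
--     hand1_max = (list(filter(lambda a: a != tie_value, hand1)))
--     hand2_max = (list(filter(lambda a: a != tie_value, hand2)))
--
--     if max(hand1_max) > max(hand2_max):
--         return "player1"
--     elif max(hand1_max) < max(hand2_max):
--         return "player2"
--     else:
--         return find_next_largest(hand1_max, hand2_max, max(hand1_max))
-- ===== SOURCE B (Python) =====
-- def find_next_largest(hand1, hand2, tie_value):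
--     """Compare the distinct card values (tie_value removed) from largest down."""
--     s1 = sorted({a for a in hand1 if a != tie_value}, reverse=True)
--     s2 = sorted({a for a in hand2 if a != tie_value}, reverse=True)
--     for x, y in zip(s1, s2):
--         if x != y:
--             return "player1" if x > y else "player2"
--     raise ValueError("hands tie completely")
-- ===== Notes on version B (the rewrite author's own statement) =====
-- stated objective: alternative
-- what changed: Replaces A's recursive filter-and-max loop (re-filtering both hands at every tie level) with a single sort of the distinct values of each hand in descending order followed by one pairwise scan for the first differing value.
import Mathlib
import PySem

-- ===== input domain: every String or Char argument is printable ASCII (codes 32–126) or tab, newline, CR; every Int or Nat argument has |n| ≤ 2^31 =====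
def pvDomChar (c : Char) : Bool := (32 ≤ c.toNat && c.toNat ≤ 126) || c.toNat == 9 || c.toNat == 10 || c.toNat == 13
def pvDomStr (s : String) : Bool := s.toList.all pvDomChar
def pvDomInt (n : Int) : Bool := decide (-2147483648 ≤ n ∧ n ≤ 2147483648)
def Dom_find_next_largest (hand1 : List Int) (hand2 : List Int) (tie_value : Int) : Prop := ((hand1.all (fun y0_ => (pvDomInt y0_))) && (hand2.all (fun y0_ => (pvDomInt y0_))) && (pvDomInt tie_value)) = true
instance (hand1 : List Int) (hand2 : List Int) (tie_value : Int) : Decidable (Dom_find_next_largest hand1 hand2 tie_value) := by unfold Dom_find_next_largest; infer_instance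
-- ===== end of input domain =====

-- B replaces A's recursive filter-and-max descent with one descending sort of each
-- hand's distinct values plus a single pairwise scan (objective: alternative algorithm).

-- ===== PORT A =====
-- A's recursion, made total with a fuel parameter (hand1.length + 1 bounds the depth:
-- after the first level the tie value is a member of the filtered hand, so it shrinks).
-- max([]) raises ValueError in Python: PySem.List.max? is none there and the port
-- returns "" — exactly the inputs Pre_ excludes.  The fuel-0 branch is unreachable
-- under Pre_ (proved in the main lemma).
def fnlA : Nat → List Int → List Int → Int → String
  | 0, _, _, _ => ""
  | (f+1), hand1, hand2, t =>
    let hand1_max := hand1.filter (fun a => a ≠ t)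
    let hand2_max := hand2.filter (fun a => a ≠ t)
    match PySem.List.max? hand1_max (fun x => x), PySem.List.max? hand2_max (fun x => x) with
    | some m1, some m2 =>
      if m1 > m2 then "player1"
      else if m1 < m2 then "player2"
      else fnlA f hand1_max hand2_max m1
    | _, _ => ""

def find_next_largest (hand1 : List Int) (hand2 : List Int) (tie_value : Int) : String :=
  fnlA (hand1.length + 1) hand1 hand2 tie_value

-- ===== PORT B =====
-- {a for a in hand if a != tie_value} sorted descending (the set is sorted at once,
-- so Python's set iteration order is irrelevant; dedup gives the distinct elements).
def pvDesc (l : List Int) (t : Int) : List Int :=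
  PySem.List.sorted (PySem.List.dedup (l.filter (fun a => a ≠ t))) (fun x => x) true

-- the 'for x, y in zip(s1, s2)' scan; falling off the end is Source B's raise ⇒ "" (outside Pre_)
def fnlCmp : List Int → List Int → String
  | x :: xs, y :: ys =>
    if x ≠ y then (if x > y then "player1" else "player2") else fnlCmp xs ys
  | _, _ => ""

def find_next_largest_alt (hand1 : List Int) (hand2 : List Int) (tie_value : Int) : String :=
  fnlCmp (pvDesc hand1 tie_value) (pvDesc hand2 tie_value)

-- ===== PRECONDITION & SPEC =====
-- Pre_ excludes exactly the inputs where A raises ValueError (and B raises too): those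
-- where one hand's descending distinct-value sequence (tie_value removed) is a prefix
-- of the other's, so a hand empties before any difference is found.
def Pre_find_next_largest (hand1 : List Int) (hand2 : List Int) (tie_value : Int) : Prop :=
  ¬ (pvDesc hand1 tie_value <+: pvDesc hand2 tie_value) ∧
  ¬ (pvDesc hand2 tie_value <+: pvDesc hand1 tie_value)
instance (hand1 : List Int) (hand2 : List Int) (tie_value : Int) : Decidable (Pre_find_next_largest hand1 hand2 tie_value) := by unfold Pre_find_next_largest; infer_instance

def pvWitness_find_next_largest : List Int × List Int × Int := ([3, 2], [3, 1], 5)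

def Spec_find_next_largest (hand1 : List Int) (hand2 : List Int) (tie_value : Int) (out : String) : Prop := out = find_next_largest_alt hand1 hand2 tie_value
instance (hand1 : List Int) (hand2 : List Int) (tie_value : Int) (out : String) : Decidable (Spec_find_next_largest hand1 hand2 tie_value out) := by unfold Spec_find_next_largest; infer_instance

-- ===== CLAIM (what is proved, stated in full; the proofs are below) =====
def Claim_equal_find_next_largest : Prop := ∀ (hand1 : List Int) (hand2 : List Int) (tie_value : Int), Dom_find_next_largest hand1 hand2 tie_value → Pre_find_next_largest hand1 hand2 tie_value → Spec_find_next_largest hand1 hand2 tie_value (find_next_largest hand1 hand2 tie_value)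

-- ===== LEMMAS AND PROOFS =====

theorem pvWitness_ok :
    Dom_find_next_largest pvWitness_find_next_largest.1 pvWitness_find_next_largest.2.1 pvWitness_find_next_largest.2.2 ∧
    Pre_find_next_largest pvWitness_find_next_largest.1 pvWitness_find_next_largest.2.1 pvWitness_find_next_largest.2.2 := by
  decide

theorem mem_pvDesc (l : List Int) (t x : Int) : x ∈ pvDesc l t ↔ x ∈ l ∧ x ≠ t := by
  simp [pvDesc, PySem.List.mem_sorted]

theorem nodup_pvDesc (l : List Int) (t : Int) : (pvDesc l t).Nodup := by
  exact ((PySem.List.sorted_perm _ _ _).nodup_iff).2 (PySem.List.nodup_dedup _)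

theorem pairwise_gt_pvDesc (l : List Int) (t : Int) : (pvDesc l t).Pairwise (· > ·) := by
  have hle := PySem.List.sorted_pairwise_rev (xs := PySem.List.dedup (l.filter (fun a => a ≠ t))) (key := fun x => x)
  have hnd := nodup_pvDesc l t
  exact (List.Pairwise.and hle hnd).imp (fun {a b} h => lt_of_le_of_ne h.1 (Ne.symm h.2))

theorem length_pvDesc_le (l : List Int) (t : Int) : (pvDesc l t).length ≤ l.length := by
  have h1 : (pvDesc l t).length = (PySem.List.dedup (l.filter (fun a => a ≠ t))).length :=
    (PySem.List.sorted_perm _ _ _).length_eq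
  have hfold : ∀ (xs s : List Int), (xs.foldl PySem.Set.add s).length ≤ s.length + xs.length := by
    intro xs
    induction xs with
    | nil => simp
    | cons a xs ih =>
      intro s
      have h1 := ih (PySem.Set.add s a)
      have h2 : (PySem.Set.add s a).length ≤ s.length + 1 := by
        simp only [PySem.Set.add]; split <;> simp
      simp only [List.foldl_cons, List.length_cons]; omega
  have h2 : (PySem.List.dedup (l.filter (fun a => a ≠ t))).length ≤ (l.filter (fun a => a ≠ t)).length := by
    simpa [PySem.List.dedup, PySem.Set.ofList, PySem.Set.empty] using
      hfold (l.filter (fun a => a ≠ t)) []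
  calc (pvDesc l t).length = _ := h1
    _ ≤ (l.filter (fun a => a ≠ t)).length := h2
    _ ≤ l.length := l.length_filter_le _

-- head of pvDesc is the value Python's max() returns on the filtered hand
theorem max?_filter_eq_head (l : List Int) (t m : Int) (rest : List Int)
    (h : pvDesc l t = m :: rest) :
    PySem.List.max? (l.filter (fun a => a ≠ t)) (fun x => x) = some m := by
  have hmem : m ∈ l.filter (fun a => a ≠ t) := by
    have : m ∈ pvDesc l t := by simp [h]
    have := (mem_pvDesc l t m).1 this
    simp [List.mem_filter, this.1, this.2]
  have hne : l.filter (fun a => a ≠ t) ≠ [] := List.ne_nil_of_mem hmem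
  have hne' : PySem.List.max? (l.filter (fun a => a ≠ t)) (fun x : Int => x) ≠ none := by
    intro hc
    exact hne ((PySem.List.max?_eq_none_iff _ _).1 hc)
  obtain ⟨m', hm'⟩ := Option.ne_none_iff_exists'.1 hne'
  have hmax := PySem.List.max?_isMax hm'
  have hm'mem := PySem.List.max?_mem hm'
  -- m is ≥ everything in the filtered list (head of the descending list)
  have hub : ∀ y ∈ l.filter (fun a => a ≠ t), y ≤ m := by
    intro y hy
    have hyl : y ∈ l ∧ y ≠ t := by
      have := List.mem_filter.1 hy; exact ⟨this.1, by simpa using this.2⟩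
    have hyd : y ∈ pvDesc l t := (mem_pvDesc l t y).2 hyl
    rw [h] at hyd
    have hpw : (m :: rest).Pairwise (· > ·) := h ▸ pairwise_gt_pvDesc l t
    rcases List.mem_cons.1 hyd with rfl | hyr
    · exact le_refl _
    · exact le_of_lt (List.rel_of_pairwise_cons hpw hyr)
  rw [hm']
  have h1 : m' ≤ m := hub m' hm'mem
  have h2 : m ≤ m' := hmax m hmem
  exact congrArg some (le_antisymm h1 h2)

-- the recursion step: filtering the max out of the filtered hand drops pvDesc's head
theorem pvDesc_step (l : List Int) (t m : Int) (rest : List Int)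
    (h : pvDesc l t = m :: rest) :
    pvDesc (l.filter (fun a => a ≠ t)) m = rest := by
  have hpw : (m :: rest).Pairwise (· > ·) := h ▸ pairwise_gt_pvDesc l t
  have hrestpw : rest.Pairwise (· > ·) := hpw.of_cons
  have hmnot : m ∉ rest := fun hc => lt_irrefl m (List.rel_of_pairwise_cons hpw hc)
  have hnd : (m :: rest).Nodup := h ▸ nodup_pvDesc l t
  -- membership characterisation of the dedup'd doubly-filtered list
  have hmem : ∀ x : Int,
      x ∈ PySem.List.dedup ((l.filter (fun a => a ≠ t)).filter (fun a => a ≠ m)) ↔ x ∈ rest := by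
    intro x
    constructor
    · intro hx
      have hx' := (PySem.List.mem_dedup _ _).1 hx
      have hxf := List.mem_filter.1 hx'
      have hxm : x ≠ m := by simpa using hxf.2
      have hxf2 := List.mem_filter.1 hxf.1
      have hxd : x ∈ pvDesc l t :=
        (mem_pvDesc l t x).2 ⟨hxf2.1, by simpa using hxf2.2⟩
      rw [h] at hxd
      rcases List.mem_cons.1 hxd with rfl | hr
      · exact absurd rfl hxm
      · exact hr
    · intro hx
      have hxd : x ∈ pvDesc l t := by rw [h]; exact List.mem_cons_of_mem _ hx
      have := (mem_pvDesc l t x).1 hxd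
      have hxm : x ≠ m := fun hc => hmnot (hc ▸ hx)
      exact (PySem.List.mem_dedup _ _).2 (by simp [List.mem_filter, this.1, this.2, hxm])
  have hperm : rest.Perm (PySem.List.dedup ((l.filter (fun a => a ≠ t)).filter (fun a => a ≠ m))) := by
    apply (List.perm_ext_iff_of_nodup hnd.of_cons (PySem.List.nodup_dedup _)).2
    intro x; exact (hmem x).symm
  exact PySem.List.sorted_rev_eq_of_perm_of_pairwise_gt _ rest (fun x => x) hperm hrestpw

theorem prefix_cons_iff_int (m : Int) (r1 r2 : List Int) :
    (m :: r1 <+: m :: r2) ↔ (r1 <+: r2) := by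
  constructor
  · rintro ⟨s, hs⟩; exact ⟨s, by simpa using hs⟩
  · rintro ⟨s, hs⟩; exact ⟨s, by simp [hs]⟩

-- main induction: with enough fuel, A's recursion computes B's pairwise comparison
theorem fnlA_eq (fuel : Nat) :
    ∀ (l1 l2 : List Int) (t : Int),
      Pre_find_next_largest l1 l2 t →
      (pvDesc l1 t).length < fuel →
      fnlA fuel l1 l2 t = fnlCmp (pvDesc l1 t) (pvDesc l2 t) := by
  induction fuel with
  | zero => intro l1 l2 t _ hlen; omega
  | succ f ih =>
    intro l1 l2 t hpre hlen
    obtain ⟨hp1, hp2⟩ := hpre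
    -- both descending lists are nonempty (nil is a prefix of anything)
    cases hd1 : pvDesc l1 t with
    | nil => exact absurd (hd1 ▸ List.nil_prefix) hp1
    | cons m1 r1 =>
    cases hd2 : pvDesc l2 t with
    | nil => exact absurd (hd2 ▸ List.nil_prefix) hp2
    | cons m2 r2 =>
    have hmax1 := max?_filter_eq_head l1 t m1 r1 hd1
    have hmax2 := max?_filter_eq_head l2 t m2 r2 hd2
    simp only [fnlA, hmax1, hmax2]
    by_cases hgt : m1 > m2
    · simp [fnlCmp, hgt, ne_of_gt hgt]
    · by_cases hlt : m1 < m2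
      · simp [fnlCmp, hlt, not_lt.2 (le_of_lt hlt), (ne_of_lt hlt)]
      · have heq : m1 = m2 := le_antisymm (not_lt.1 hgt) (not_lt.1 hlt)
        subst heq
        have hs1 := pvDesc_step l1 t m1 r1 hd1
        have hs2 := pvDesc_step l2 t m1 r2 hd2
        have hpre' : Pre_find_next_largest (l1.filter (fun a => a ≠ t)) (l2.filter (fun a => a ≠ t)) m1 := by
          constructor
          · rw [hs1, hs2]; intro hc
            exact hp1 (by rw [hd1, hd2]; exact (prefix_cons_iff_int m1 r1 r2).2 hc)
          · rw [hs1, hs2]; intro hc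
            exact hp2 (by rw [hd1, hd2]; exact (prefix_cons_iff_int m1 r2 r1).2 hc)
        have hlen' : (pvDesc (l1.filter (fun a => a ≠ t)) m1).length < f := by
          rw [hs1]
          have : (m1 :: r1).length < f + 1 := hd1 ▸ hlen
          simp at this; omega
        rw [ih _ _ _ hpre' hlen', hs1, hs2]
        simp [fnlCmp]

-- ===== VERDICT (by name: the statement is the Claim_ definition above) =====
theorem find_next_largest_spec : Claim_equal_find_next_largest := by
  intro hand1 hand2 tie_value _ hpre
  unfold Spec_find_next_largest find_next_largest find_next_largest_alt
  exact fnlA_eq (hand1.length + 1) hand1 hand2 tie_value hpre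
    (Nat.lt_succ_of_le (length_pvDesc_le hand1 tie_value))
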